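-- pv_equiv track=rewrite | github.com/akk-026/Walmart-Sparkathon | data_processor.py | extract_city_state
-- ===== SOURCE A (Python) =====
-- from typing import Dict, List, Tuple
--
-- def extract_city_state(location_str: str) -> Tuple[str, str]:
--     # Split by comma, strip whitespace
--     parts = [p.strip() for p in location_str.split(',')]
--     # Remove empty, numeric, and 'India' parts
--     filtered = [p for p in parts if p and not p.isdigit() and p.upper() != 'INDIA']
--     # City and state are usually the last two filtered parts
--     if len(filtered) >= 2:
--         city = filtered[-2].upper()
--         state = filtered[-1].strip()
--         return (city, state)
--     return ("", "")
-- ===== SOURCE B (Python) =====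
-- def extract_city_state(location_str: str):
--     # Character-level tokenizer: one pass over the characters (with a ',' sentinel),
--     # building each token in a buffer; no split(), no filtered list, no indexing.
--     # Two registers hold the last two valid tokens seen.
--     prev = None
--     last = None
--     buf = []
--     for ch in location_str + ',':
--         if ch == ',':
--             tok = ''.join(buf).strip()
--             buf = []
--             if tok and not tok.isdigit() and tok.upper() != 'INDIA':
--                 prev, last = last, tok
--         else:
--             buf.append(ch)
--     if prev is None:
--         return ("", "")
--     return (prev.upper(), last)
-- ===== Notes on version B (the rewrite author's own statement) =====
-- stated objective: alternative
-- what changed: Replaces split-then-filter-then-index-[-2]/[-1] with a character-level tokenizer: one pass over the characters builds each comma-delimited token in a buffer and two registers retain the last two valid tokens, so no list of parts, no filtered list and no negative indexing exist at all.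
import Mathlib
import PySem

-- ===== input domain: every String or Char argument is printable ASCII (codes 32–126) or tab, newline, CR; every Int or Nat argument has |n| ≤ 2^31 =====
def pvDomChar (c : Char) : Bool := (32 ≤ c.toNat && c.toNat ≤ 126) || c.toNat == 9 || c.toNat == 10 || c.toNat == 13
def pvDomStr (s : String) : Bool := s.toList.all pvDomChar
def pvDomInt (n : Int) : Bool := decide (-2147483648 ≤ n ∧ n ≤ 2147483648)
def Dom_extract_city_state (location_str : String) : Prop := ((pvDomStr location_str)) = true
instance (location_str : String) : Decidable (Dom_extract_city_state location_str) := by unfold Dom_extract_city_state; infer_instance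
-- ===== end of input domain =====

-- B replaces A's split/filter/index-[-2],[-1] pipeline by a character-level tokenizer: one pass
-- over the characters builds each comma-delimited token in a buffer and two registers keep the
-- last two valid tokens (objective: alternative; return values proved equal).


-- ===== PORT A =====
-- the element test 'p and not p.isdigit() and p.upper() != 'INDIA''
def ecsValid (p : String) : Bool :=
  !(p == "") && !(PySem.Str.strIsdigit p) && !(PySem.Str.upper p == "INDIA")

def extract_city_state (location_str : String) : String × String :=
  let parts := ((PySem.Str.split? location_str ",").getD []).map PySem.Str.strip
  let filtered := parts.filter ecsValid
  if 2 ≤ filtered.length then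
    let city := PySem.Str.upper ((PySem.List.pyGet? filtered (-2)).getD "")
    let state := PySem.Str.strip ((PySem.List.pyGet? filtered (-1)).getD "")
    (city, state)
  else ("", "")

-- ===== PORT B =====
-- close the current buffer into a token and, when valid, shift it into the two registers
def ecsClose (pl : Option String × Option String) (buf : List Char) :
    Option String × Option String :=
  let tok := PySem.Str.strip (String.ofList buf)
  if ecsValid tok then (pl.2, some tok) else pl

-- 'if prev is None: return ("",""); return (prev.upper(), last)'
def ecsFinish : Option String × Option String → String × String
  | (some c, some s) => (PySem.Str.upper c, s)
  | _ => ("", "")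

-- the character loop of Source B: buf is the current token buffer, pl the two registers
def ecsLoop : List Char → List Char → Option String × Option String → String × String
  | [], _, pl => ecsFinish pl
  | c :: cs, buf, pl =>
    if c = ',' then ecsLoop cs [] (ecsClose pl buf)
    else ecsLoop cs (buf ++ [c]) pl

def extract_city_state_alt (location_str : String) : String × String :=
  ecsLoop (location_str.toList ++ [',']) [] (none, none)

-- ===== PRECONDITION & SPEC =====
def Spec_extract_city_state (location_str : String) (out : String × String) : Prop := out = extract_city_state_alt location_str
instance (location_str : String) (out : String × String) : Decidable (Spec_extract_city_state location_str out) := by unfold Spec_extract_city_state; infer_instance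

-- ===== CLAIM (what is proved, stated in full; the proofs are below) =====
def Claim_equal_extract_city_state : Prop := ∀ (location_str : String), Dom_extract_city_state location_str → Spec_extract_city_state location_str (extract_city_state location_str)

-- ===== LEMMAS AND PROOFS =====

-- strip is idempotent
theorem dropWhile_idem {α : Type} (p : α → Bool) (l : List α) :
    List.dropWhile p (List.dropWhile p l) = List.dropWhile p l := by
  induction l with
  | nil => rfl
  | cons a t ih =>
    by_cases h : p a = true
    · simp [List.dropWhile, h, ih]
    · simp [List.dropWhile, h]

theorem lstrip_rstrip_of_lstripped (l : List Char)
    (h : List.dropWhile PySem.Chars.isspace l = l) :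
    List.dropWhile PySem.Chars.isspace (PySem.Chars.rstrip l) = PySem.Chars.rstrip l := by
  rcases hp : PySem.Chars.rstrip l with _ | ⟨b, t⟩
  · rfl
  · have hpre : PySem.Chars.rstrip l <+: l := by
      have := List.dropWhile_suffix (l := l.reverse) PySem.Chars.isspace
      have := List.reverse_prefix.mpr this
      simpa [PySem.Chars.rstrip] using this
    rw [hp] at hpre
    obtain ⟨t', ht'⟩ := hpre
    have hb : PySem.Chars.isspace b = false := by
      have := (List.dropWhile_eq_self_iff).mp h
      rw [← ht'] at this
      simpa using this (by simp)
    simp [List.dropWhile, hb]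

theorem chars_strip_strip (cs : List Char) :
    PySem.Chars.strip (PySem.Chars.strip cs) = PySem.Chars.strip cs := by
  simp only [PySem.Chars.strip]
  rw [show PySem.Chars.lstrip (PySem.Chars.rstrip (PySem.Chars.lstrip cs))
        = PySem.Chars.rstrip (PySem.Chars.lstrip cs) from
      lstrip_rstrip_of_lstripped _ (by simpa [PySem.Chars.lstrip] using dropWhile_idem PySem.Chars.isspace cs)]
  simp only [PySem.Chars.rstrip]
  rw [List.reverse_reverse, dropWhile_idem]

theorem strip_strip (s : String) : PySem.Str.strip (PySem.Str.strip s) = PySem.Str.strip s := by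
  simp only [PySem.Str.strip, String.toList_ofList]
  exact congrArg String.ofList (chars_strip_strip _)

-- structural recursion computing the comma pieces of a char list (spec for Chars.splitOn's fuel loop)
def csplit : List Char → List (List Char)
  | [] => [[]]
  | c :: cs => if c = ',' then [] :: csplit cs else (csplit cs).modifyHead (c :: ·)

theorem modifyHead_nil_append {α : Type} (l : List (List α)) :
    l.modifyHead (fun x => [] ++ x) = l := by cases l <;> simp

theorem modifyHead_id' {α : Type} (l : List (List α)) :
    l.modifyHead (fun x => x) = l := by cases l <;> simp

theorem splitOn_go_eq (fuel : Nat) (l cur : List Char) (acc : List (List Char))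
    (hf : l.length ≤ fuel) :
    PySem.Chars.splitOn.go [','] fuel l cur acc
      = acc.reverse ++ (csplit l).modifyHead (cur.reverse ++ ·) := by
  induction fuel generalizing l cur acc with
  | zero =>
    have : l = [] := List.eq_nil_of_length_eq_zero (Nat.le_zero.mp hf)
    subst this
    simp [PySem.Chars.splitOn.go, csplit]
  | succ fuel ih =>
    cases l with
    | nil => simp [PySem.Chars.splitOn.go, csplit]
    | cons c rest =>
      by_cases hc : c = ','
      · subst hc
        have hpre : [','].isPrefixOf (',' :: rest) = true := by simp [List.isPrefixOf]
        rw [show PySem.Chars.splitOn.go [','] (fuel+1) (',' :: rest) cur acc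
              = PySem.Chars.splitOn.go [','] fuel rest [] (cur.reverse :: acc) by
            simp [PySem.Chars.splitOn.go, hpre]]
        rw [ih rest [] (cur.reverse :: acc) (by simpa using Nat.le_of_succ_le_succ hf)]
        simp [csplit, modifyHead_id']
      · have hpre : [','].isPrefixOf (c :: rest) = false := by
          simp [List.isPrefixOf]; exact fun h => absurd h.symm hc
        rw [show PySem.Chars.splitOn.go [','] (fuel+1) (c :: rest) cur acc
              = PySem.Chars.splitOn.go [','] fuel rest (c :: cur) acc by
            simp [PySem.Chars.splitOn.go, hpre]]
        rw [ih rest (c :: cur) acc (by simpa using Nat.le_of_succ_le_succ hf)]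
        simp only [csplit, if_neg hc, List.modifyHead_modifyHead, List.reverse_cons,
          List.append_assoc, List.singleton_append]
        rfl

theorem splitOn_comma_eq_csplit (cs : List Char) :
    PySem.Chars.splitOn cs [','] = csplit cs := by
  rw [PySem.Chars.splitOn, splitOn_go_eq cs.length.succ cs [] [] (Nat.le_succ _)]
  simp [modifyHead_id']

-- B's loop = finish after folding ecsClose over the comma pieces
theorem ecsLoop_eq_fold (cs : List Char) :
    ∀ (buf : List Char) (pl : Option String × Option String),
    ecsLoop (cs ++ [',']) buf pl
      = ecsFinish (((csplit cs).modifyHead (buf ++ ·)).foldl ecsClose pl) := by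
  induction cs with
  | nil =>
    intro buf pl
    simp [ecsLoop, csplit, List.modifyHead]
  | cons c rest ih =>
    intro buf pl
    by_cases hc : c = ','
    · subst hc
      show ecsLoop (',' :: (rest ++ [','])) buf pl = _
      rw [show ecsLoop (',' :: (rest ++ [','])) buf pl
            = ecsLoop (rest ++ [',']) [] (ecsClose pl buf) from rfl]
      rw [ih [] (ecsClose pl buf), modifyHead_nil_append,
          show csplit (',' :: rest) = [] :: csplit rest from by simp [csplit]]
      simp [List.modifyHead]
    · show ecsLoop (c :: (rest ++ [','])) buf pl = _
      rw [show ecsLoop (c :: (rest ++ [','])) buf pl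
            = ecsLoop (rest ++ [',']) (buf ++ [c]) pl by simp [ecsLoop, hc]]
      rw [ih (buf ++ [c]) pl]
      simp only [csplit, if_neg hc, List.modifyHead_modifyHead, List.append_assoc,
        List.singleton_append]
      rfl

-- folding ecsClose over tokens = shifting the stripped-and-filtered tokens through two registers
def ecsShift (pl : Option String × Option String) (x : String) : Option String × Option String :=
  (pl.2, some x)

theorem fold_close_eq_fold_shift (T : List (List Char)) :
    ∀ pl, T.foldl ecsClose pl
      = ((T.map (fun t => PySem.Str.strip (String.ofList t))).filter ecsValid).foldl ecsShift pl := by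
  induction T with
  | nil => intro pl; rfl
  | cons t rest ih =>
    intro pl
    simp only [List.map_cons, List.filter_cons, List.foldl_cons]
    by_cases h : ecsValid (PySem.Str.strip (String.ofList t)) = true
    · rw [show ecsClose pl t = ecsShift pl (PySem.Str.strip (String.ofList t)) by
        simp [ecsClose, ecsShift, h]]
      rw [if_pos h, List.foldl_cons]
      exact ih _
    · rw [show ecsClose pl t = pl by simp [ecsClose, h]]
      rw [if_neg h]
      exact ih pl

theorem fold_shift_last_two (pre : List String) (c s : String) (pl : Option String × Option String) :
    (pre ++ [c, s]).foldl ecsShift pl = (some c, some s) := by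
  rw [List.foldl_append]
  rfl

-- the filtered list A builds, as a function of the raw pieces
theorem ecsF_eq (location_str : String) :
    (((PySem.Str.split? location_str ",").getD []).map PySem.Str.strip).filter ecsValid
      = ((csplit location_str.toList).map (fun t => PySem.Str.strip (String.ofList t))).filter ecsValid := by
  have h : PySem.Str.split? location_str "," =
      some ((csplit location_str.toList).map String.ofList) := by
    rw [show PySem.Str.split? location_str ","
          = Option.map (List.map String.ofList) (PySem.Chars.split? location_str.toList [',']) from rfl]
    rw [show PySem.Chars.split? location_str.toList [',']
          = some (PySem.Chars.splitOn location_str.toList [',']) from by simp [PySem.Chars.split?]]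
    rw [splitOn_comma_eq_csplit]
    rfl
  rw [h]
  simp only [Option.getD_some, List.map_map]
  rfl

theorem mem_filtered_strip (T : List (List Char)) (s : String)
    (h : s ∈ (T.map (fun t => PySem.Str.strip (String.ofList t))).filter ecsValid) :
    PySem.Str.strip s = s := by
  have h1 := List.mem_of_mem_filter h
  obtain ⟨x, _, rfl⟩ := List.mem_map.mp h1
  exact strip_strip _

-- ===== VERDICT (by name: the statement is the Claim_ definition above) =====
theorem extract_city_state_spec : Claim_equal_extract_city_state := by
  intro location_str _
  unfold Spec_extract_city_state extract_city_state extract_city_state_alt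
  rw [ecsLoop_eq_fold, modifyHead_nil_append, fold_close_eq_fold_shift]
  set F := ((csplit location_str.toList).map (fun t => PySem.Str.strip (String.ofList t))).filter ecsValid with hF
  show (if 2 ≤ ((((PySem.Str.split? location_str ",").getD []).map PySem.Str.strip).filter ecsValid).length then
      (PySem.Str.upper ((PySem.List.pyGet? ((((PySem.Str.split? location_str ",").getD []).map PySem.Str.strip).filter ecsValid) (-2)).getD ""),
       PySem.Str.strip ((PySem.List.pyGet? ((((PySem.Str.split? location_str ",").getD []).map PySem.Str.strip).filter ecsValid) (-1)).getD ""))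
    else ("", "")) = ecsFinish (F.foldl ecsShift (none, none))
  rw [show (((PySem.Str.split? location_str ",").getD []).map PySem.Str.strip).filter ecsValid = F from by rw [ecsF_eq, hF]]
  rcases hr : F.reverse with _ | ⟨s, _ | ⟨c, rest⟩⟩
  · have h0 : F = [] := by simpa using congrArg List.reverse hr
    rw [h0]
    rfl
  · have h1 : F = [s] := by simpa using congrArg List.reverse hr
    rw [h1]
    rfl
  · have hfl : F = rest.reverse ++ [c, s] := by
      have := congrArg List.reverse hr
      simpa using this
    have hlen : F.length = rest.length + 2 := by simp [hfl]
    rw [if_pos (by omega)]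
    have hneg1 : PySem.List.pyGet? F (-1) = some s := by
      rw [PySem.List.pyGet?_neg_one, hfl]
      simp [List.getLast?_append]
    have hneg2 : PySem.List.pyGet? F (-2) = some c := by
      rw [PySem.List.pyGet?_neg_ofNat F 2 (by omega) (by omega), hlen, hfl]
      have : rest.length + 2 - 2 = rest.reverse.length + 0 := by simp
      rw [this, List.getElem?_append_right (by omega)]
      simp
    have hs : PySem.Str.strip s = s := by
      apply mem_filtered_strip
      rw [← hF, hfl]; simp
    rw [hneg1, hneg2, hfl, fold_shift_last_two]
    simp [ecsFinish, hs]
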